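-- pv_equiv track=rewrite | github.com/Jawkx/ngao_calculator | calculation.py | passportcheck
-- ===== SOURCE A (Python) =====
-- def lsum(arr):
-- 	sum = 0
-- 	for x in range (0,len(arr)):
-- 		sum = sum + arr[x]
--
-- 	return sum
--
-- def passportcheck(target):
-- 	tscount = 0
-- 	numlist = []
-- 	for	i in range (0,3):
-- 		currentcount = target[i][0]
--
-- 		if currentcount == 6 or currentcount == 3 :
-- 			tscount = tscount + 1
-- 			numlist.append(3)
-- 		else:
-- 			numlist.append(currentcount)
--
-- 	currentsum = lsum(numlist)
--
-- 	if currentsum%10 == 0 :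
-- 		return True
--
-- 	for j in range (0,tscount):
-- 		currentsum = currentsum +3
--
-- 		if currentsum%10 == 0 :
-- 			return True
--
-- 	return False
-- ===== SOURCE B (Python) =====
-- def passportcheck(target):
--     # one pass: base sum with 6/3 collapsed to 3, count of adjustable slots;
--     # then solve base + 3*k ≡ 0 (mod 10) in closed form (7 is 3's inverse mod 10)
--     base = 0
--     tscount = 0
--     for row in target[:3]:
--         v = row[0]
--         if v == 6 or v == 3:
--             base += 3
--             tscount += 1
--         else:
--             base += v
--     k0 = (7 * (-base % 10)) % 10
--     return k0 <= tscount
-- ===== Notes on version B (the rewrite author's own statement) =====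
-- stated objective: simpler
-- what changed: B replaces A's helper-summed numlist and second adjustment loop (trying up to tscount additions of 3) by a single accumulating pass plus a closed-form solution of base + 3k ≡ 0 (mod 10) using 7 as 3's inverse mod 10, returning k0 <= tscount.
import Mathlib
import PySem

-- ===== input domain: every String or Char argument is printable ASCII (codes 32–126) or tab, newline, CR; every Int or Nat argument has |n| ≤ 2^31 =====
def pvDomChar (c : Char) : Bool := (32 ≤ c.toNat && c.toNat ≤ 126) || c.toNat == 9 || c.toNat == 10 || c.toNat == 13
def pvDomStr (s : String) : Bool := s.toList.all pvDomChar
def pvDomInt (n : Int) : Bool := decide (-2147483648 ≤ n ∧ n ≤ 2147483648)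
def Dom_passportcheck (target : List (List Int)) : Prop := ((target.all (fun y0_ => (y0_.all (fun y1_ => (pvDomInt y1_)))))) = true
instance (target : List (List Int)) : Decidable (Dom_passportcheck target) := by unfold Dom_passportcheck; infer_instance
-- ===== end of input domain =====

-- B replaces A's second (adjustment) loop by a closed-form solution of base + 3k ≡ 0 (mod 10); objective: simpler.

-- ===== PORT A =====
-- indices produced by range(0, len(arr)) are always in range, so the .getD default is never taken
def lsum (arr : List Int) : Int :=
  (PySem.List.pyRange 0 arr.length 1).foldl
    (fun s x => s + (PySem.List.pyGet? arr x).getD 0) 0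

-- the 'for j in range(0, tscount)' loop with its early 'return True'
def pcAdjLoop (currentsum : Int) : Nat → Bool
  | 0 => false
  | n + 1 =>
    let currentsum := currentsum + 3
    if PySem.Int.mod currentsum 10 = 0 then true else pcAdjLoop currentsum n

-- under Pre_ the pyGet?/headD defaults are never taken (target[i][0] exists for i < 3)
def passportcheck (target : List (List Int)) : Bool :=
  let st := (PySem.List.pyRange 0 3 1).foldl
    (fun (st : Int × List Int) i =>
      let currentcount := ((PySem.List.pyGet? target i).getD []).headD 0
      if currentcount = 6 ∨ currentcount = 3 then (st.1 + 1, st.2 ++ [3])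
      else (st.1, st.2 ++ [currentcount])) (0, [])
  let tscount := st.1
  let currentsum := lsum st.2
  if PySem.Int.mod currentsum 10 = 0 then true
  else pcAdjLoop currentsum tscount.toNat

-- ===== PORT B =====
def passportcheck_alt (target : List (List Int)) : Bool :=
  let p := (PySem.List.slice target (some 0) (some 3)).foldl
    (fun (p : Int × Int) row =>
      let v := row.headD 0   -- row[0]; rows are nonempty under Pre_
      if v = 6 ∨ v = 3 then (p.1 + 3, p.2 + 1) else (p.1 + v, p.2)) (0, 0)
  let k0 := PySem.Int.mod (7 * PySem.Int.mod (-p.1) 10) 10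
  decide (k0 ≤ p.2)

-- ===== PRECONDITION & SPEC =====
-- Pre_ excludes exactly the inputs where A raises IndexError: fewer than 3 rows, or an empty row among the first three.
def Pre_passportcheck (target : List (List Int)) : Prop :=
  match target with
  | a :: b :: c :: _ => a ≠ [] ∧ b ≠ [] ∧ c ≠ []
  | _ => False
instance (target : List (List Int)) : Decidable (Pre_passportcheck target) := by
  unfold Pre_passportcheck; rcases target with _ | ⟨a, _ | ⟨b, _ | ⟨c, _⟩⟩⟩ <;> infer_instance
def pvWitness_passportcheck : List (List Int) := [[1], [2], [3]]

def Spec_passportcheck (target : List (List Int)) (out : Bool) : Prop := out = passportcheck_alt target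
instance (target : List (List Int)) (out : Bool) : Decidable (Spec_passportcheck target out) := by unfold Spec_passportcheck; infer_instance

-- ===== CLAIM (what is proved, stated in full; the proofs are below) =====
def Claim_equal_passportcheck : Prop := ∀ (target : List (List Int)), Dom_passportcheck target → Pre_passportcheck target → Spec_passportcheck target (passportcheck target)

-- ===== LEMMAS AND PROOFS =====

-- A's "already divisible, else adjust up to n times" equals B's closed-form bound on the needed steps.
lemma pc_core (s : Int) (n : Nat) (hn : n ≤ 3) :
    (if PySem.Int.mod s 10 = 0 then true else pcAdjLoop s n)
      = decide (PySem.Int.mod (7 * PySem.Int.mod (-s) 10) 10 ≤ (n : Int)) := by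
  have h10 : (0 : Int) < 10 := by norm_num
  have hr0 : (0 : Int) ≤ (-s) % 10 := Int.emod_nonneg _ (by norm_num)
  have hr1 : (-s) % 10 < 10 := Int.emod_lt_of_pos _ (by norm_num)
  interval_cases n <;>
  · simp only [pcAdjLoop, PySem.Int.mod_eq_emod_of_pos h10]
    generalize hg : (-s) % 10 = r at *
    interval_cases r <;> split_ifs <;>
      first
        | (refine (decide_eq_true ?_).symm; omega)
        | (refine (decide_eq_false ?_).symm; omega)

-- ===== VERDICT (by name: the statement is the Claim_ definition above) =====
theorem passportcheck_spec : Claim_equal_passportcheck := by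
  intro target _ hpre
  unfold Spec_passportcheck
  rcases target with _ | ⟨a, _ | ⟨b, _ | ⟨c, rest⟩⟩⟩
  · exact hpre.elim
  · exact hpre.elim
  · exact hpre.elim
  obtain ⟨ha, hb, hc⟩ := hpre
  rcases a with _ | ⟨x, as⟩; · exact absurd rfl ha
  rcases b with _ | ⟨y, bs⟩; · exact absurd rfl hb
  rcases c with _ | ⟨z, cs⟩; · exact absurd rfl hc
  have hrange : PySem.List.pyRange 0 3 1 = [0, 1, 2] := by decide
  have hslice : PySem.List.slice ((x :: as) :: (y :: bs) :: (z :: cs) :: rest) (some 0) (some 3)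
      = [x :: as, y :: bs, z :: cs] := by
    simp [PySem.List.slice]
  have h0 : PySem.List.pyGet? ((x :: as) :: (y :: bs) :: (z :: cs) :: rest) 0 = some (x :: as) := by
    simp [PySem.List.pyGet?, PySem.List.pyIdx?,
      show (0 : Int) ≤ (rest.length : Int) + 1 + 1 by omega]
  have h1 : PySem.List.pyGet? ((x :: as) :: (y :: bs) :: (z :: cs) :: rest) 1 = some (y :: bs) := by
    simp [PySem.List.pyGet?, PySem.List.pyIdx?,
      show (0 : Int) ≤ (rest.length : Int) + 1 by omega]
  have h2 : PySem.List.pyGet? ((x :: as) :: (y :: bs) :: (z :: cs) :: rest) 2 = some (z :: cs) := by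
    simp [PySem.List.pyGet?, PySem.List.pyIdx?,
      show (2 : Int) ≤ (rest.length : Int) + 1 + 1 by omega]
  have hl : ∀ p q r : Int, lsum [p, q, r] = 0 + p + q + r := by
    intro p q r
    simp [lsum, hrange, PySem.List.pyGet?, PySem.List.pyIdx?, List.foldl]
    try ring
  have c0 := fun s => pc_core s 0 (by norm_num)
  have c1 := fun s => pc_core s 1 (by norm_num)
  have c2 := fun s => pc_core s 2 (by norm_num)
  simp only [passportcheck, passportcheck_alt, hrange, hslice, List.foldl,
    h0, h1, h2, Option.getD_some, List.headD_cons]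
  by_cases hx : x = 6 ∨ x = 3 <;> by_cases hy : y = 6 ∨ y = 3 <;> by_cases hz : z = 6 ∨ z = 3 <;>
    (first | simp only [if_pos hx] | simp only [if_neg hx]) <;>
    (first | simp only [if_pos hy] | simp only [if_neg hy]) <;>
    (first | simp only [if_pos hz] | simp only [if_neg hz]) <;>
    simp only [List.nil_append, List.cons_append] <;>
    rw [hl] <;>
    (first | exact c0 _ | exact c1 _ | exact c2 _)
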